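-- pv_equiv track=rewrite | github.com/Domoed19/lessons | lessons_07/solution_02.py | cities_and_countrys
-- ===== SOURCE A (Python) =====
-- def cities_and_countrys (city):
--     mapping = {
--         "Belarus" : ["Minsk", "Grodno", "Gomel"],
--         "UK" : ["London", "Manchester", "Bristol"],
--         "USA": ["Los Angeles", "New York", "Chicago"],
--         "Germany": ["Berlin", "Hamburg", "Cologne"],
--     }
--     for country, cities_list in mapping.items():
--         if city in cities_list:
--             return country
-- ===== SOURCE B (Python) =====
-- def cities_and_countrys(city):
--     country_of = {
--         "Minsk": "Belarus", "Grodno": "Belarus", "Gomel": "Belarus",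
--         "London": "UK", "Manchester": "UK", "Bristol": "UK",
--         "Los Angeles": "USA", "New York": "USA", "Chicago": "USA",
--         "Berlin": "Germany", "Hamburg": "Germany", "Cologne": "Germany",
--     }
--     return country_of.get(city)
-- ===== Notes on version B (the rewrite author's own statement) =====
-- stated objective: idiomatic
-- what changed: Replaces the loop over country->cities lists with an inverted city->country dict literal and a single .get lookup, removing the loop and the inner membership test entirely.
import Mathlib
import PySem

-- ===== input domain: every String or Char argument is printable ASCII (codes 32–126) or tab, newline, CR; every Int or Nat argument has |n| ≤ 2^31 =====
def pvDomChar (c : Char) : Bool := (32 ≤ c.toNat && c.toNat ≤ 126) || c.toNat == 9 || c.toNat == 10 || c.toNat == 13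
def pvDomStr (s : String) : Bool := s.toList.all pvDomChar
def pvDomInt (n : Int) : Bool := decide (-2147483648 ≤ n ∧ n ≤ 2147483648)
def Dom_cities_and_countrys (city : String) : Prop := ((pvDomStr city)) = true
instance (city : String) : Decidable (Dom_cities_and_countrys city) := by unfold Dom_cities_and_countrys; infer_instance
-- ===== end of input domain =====

-- B replaces A's loop over country→cities lists with an inverted city→country dict and one lookup (idiomatic; return value only).
-- ===== PORT A =====
def cities_and_countrys (city : String) : Option String :=
  let mapping : PySem.Dict String (List String) := PySem.Dict.ofList
    [("Belarus", ["Minsk", "Grodno", "Gomel"]),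
     ("UK", ["London", "Manchester", "Bristol"]),
     ("USA", ["Los Angeles", "New York", "Chicago"]),
     ("Germany", ["Berlin", "Hamburg", "Cologne"])]
  -- for country, cities_list in mapping.items(): if city in cities_list: return country
  (mapping.items.find? (fun p => p.2.contains city)).map (·.1)

-- ===== PORT B =====
def cities_and_countrys_alt (city : String) : Option String :=
  let country_of : PySem.Dict String String := PySem.Dict.ofList
    [("Minsk", "Belarus"), ("Grodno", "Belarus"), ("Gomel", "Belarus"),
     ("London", "UK"), ("Manchester", "UK"), ("Bristol", "UK"),
     ("Los Angeles", "USA"), ("New York", "USA"), ("Chicago", "USA"),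
     ("Berlin", "Germany"), ("Hamburg", "Germany"), ("Cologne", "Germany")]
  country_of.get? city

-- ===== PRECONDITION & SPEC =====
def Spec_cities_and_countrys (city : String) (out : Option String) : Prop := out = cities_and_countrys_alt city
instance (city : String) (out : Option String) : Decidable (Spec_cities_and_countrys city out) := by unfold Spec_cities_and_countrys; infer_instance

-- ===== CLAIM (what is proved, stated in full; the proofs are below) =====
def Claim_equal_cities_and_countrys : Prop := ∀ (city : String), Dom_cities_and_countrys city → Spec_cities_and_countrys city (cities_and_countrys city)

-- ===== LEMMAS AND PROOFS =====

-- ===== VERDICT (by name: the statement is the Claim_ definition above) =====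
theorem cities_and_countrys_spec : Claim_equal_cities_and_countrys := by
  intro city _
  unfold Spec_cities_and_countrys cities_and_countrys cities_and_countrys_alt
  have hA : (PySem.Dict.ofList
      [("Belarus", ["Minsk", "Grodno", "Gomel"]),
       ("UK", ["London", "Manchester", "Bristol"]),
       ("USA", ["Los Angeles", "New York", "Chicago"]),
       ("Germany", ["Berlin", "Hamburg", "Cologne"])]).items =
      [("Belarus", ["Minsk", "Grodno", "Gomel"]),
       ("UK", ["London", "Manchester", "Bristol"]),
       ("USA", ["Los Angeles", "New York", "Chicago"]),
       ("Germany", ["Berlin", "Hamburg", "Cologne"])] := by rfl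
  have hB : (PySem.Dict.ofList
      [("Minsk", "Belarus"), ("Grodno", "Belarus"), ("Gomel", "Belarus"),
       ("London", "UK"), ("Manchester", "UK"), ("Bristol", "UK"),
       ("Los Angeles", "USA"), ("New York", "USA"), ("Chicago", "USA"),
       ("Berlin", "Germany"), ("Hamburg", "Germany"), ("Cologne", "Germany")]) =
      PySem.Dict.mk
      [("Minsk", "Belarus"), ("Grodno", "Belarus"), ("Gomel", "Belarus"),
       ("London", "UK"), ("Manchester", "UK"), ("Bristol", "UK"),
       ("Los Angeles", "USA"), ("New York", "USA"), ("Chicago", "USA"),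
       ("Berlin", "Germany"), ("Hamburg", "Germany"), ("Cologne", "Germany")] := by rfl
  simp only [hA, hB]
  by_cases h1 : city = "Minsk"
  · subst h1; decide
  by_cases h2 : city = "Grodno"
  · subst h2; decide
  by_cases h3 : city = "Gomel"
  · subst h3; decide
  by_cases h4 : city = "London"
  · subst h4; decide
  by_cases h5 : city = "Manchester"
  · subst h5; decide
  by_cases h6 : city = "Bristol"
  · subst h6; decide
  by_cases h7 : city = "Los Angeles"
  · subst h7; decide
  by_cases h8 : city = "New York"
  · subst h8; decide
  by_cases h9 : city = "Chicago"
  · subst h9; decide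
  by_cases h10 : city = "Berlin"
  · subst h10; decide
  by_cases h11 : city = "Hamburg"
  · subst h11; decide
  by_cases h12 : city = "Cologne"
  · subst h12; decide
  simp only [List.find?, List.contains, List.elem, PySem.Dict.get?]
  have b1 : (city == "Minsk") = false := by simp [h1]
  have c1 : ("Minsk" == city) = false := by simp [Ne.symm h1]
  have b2 : (city == "Grodno") = false := by simp [h2]
  have c2 : ("Grodno" == city) = false := by simp [Ne.symm h2]
  have b3 : (city == "Gomel") = false := by simp [h3]
  have c3 : ("Gomel" == city) = false := by simp [Ne.symm h3]
  have b4 : (city == "London") = false := by simp [h4]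
  have c4 : ("London" == city) = false := by simp [Ne.symm h4]
  have b5 : (city == "Manchester") = false := by simp [h5]
  have c5 : ("Manchester" == city) = false := by simp [Ne.symm h5]
  have b6 : (city == "Bristol") = false := by simp [h6]
  have c6 : ("Bristol" == city) = false := by simp [Ne.symm h6]
  have b7 : (city == "Los Angeles") = false := by simp [h7]
  have c7 : ("Los Angeles" == city) = false := by simp [Ne.symm h7]
  have b8 : (city == "New York") = false := by simp [h8]
  have c8 : ("New York" == city) = false := by simp [Ne.symm h8]
  have b9 : (city == "Chicago") = false := by simp [h9]
  have c9 : ("Chicago" == city) = false := by simp [Ne.symm h9]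
  have b10 : (city == "Berlin") = false := by simp [h10]
  have c10 : ("Berlin" == city) = false := by simp [Ne.symm h10]
  have b11 : (city == "Hamburg") = false := by simp [h11]
  have c11 : ("Hamburg" == city) = false := by simp [Ne.symm h11]
  have b12 : (city == "Cologne") = false := by simp [h12]
  have c12 : ("Cologne" == city) = false := by simp [Ne.symm h12]
  simp only [b1, c1, b2, c2, b3, c3, b4, c4, b5, c5, b6, c6, b7, c7, b8, c8, b9, c9, b10, c10, b11, c11, b12, c12]
  rfl
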